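-- pv_equiv track=rewrite | github.com/bbehemott/Toolboxv2 | backend/core/huntkit_tools.py | _extract_command_output
-- ===== SOURCE A (Python) =====
-- def _extract_command_output(full_output: str, command: str) -> str:
--     """Extrait la sortie réelle de la commande depuis la sortie Metasploit"""
--     lines = full_output.split('\n')
--
--     # Chercher la ligne avec la commande exécutée
--     command_found = False
--     output_lines = []
--
--     for line in lines:
--         line_clean = line.strip()
--
--         # ✅ Détecter le début de l'output de la commande
--         if command in line_clean and ('meterpreter' in line_clean or 'shell' in line_clean):
--             command_found = True
--             continue
--
--         # ✅ Détecter la fin (prompt suivant)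
--         if command_found and ('meterpreter >' in line_clean or 'shell >' in line_clean or 'msf6 >' in line_clean):
--             break
--
--         # ✅ Collecter les lignes de sortie
--         if command_found and line_clean and not line_clean.startswith('['):
--             output_lines.append(line_clean)
--
--     result = '\n'.join(output_lines).strip()
--     return result if result else f"Commande '{command}' exécutée (pas de sortie visible)"
-- ===== SOURCE B (Python) =====
-- def _extract_command_output(full_output: str, command: str) -> str:
--     fallback = f"Commande '{command}' exécutée (pas de sortie visible)"
--     lines = [l.strip() for l in full_output.split('\n')]
--
--     def is_start(lc):
--         return command in lc and ('meterpreter' in lc or 'shell' in lc)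
--
--     def is_end(lc):
--         return 'meterpreter >' in lc or 'shell >' in lc or 'msf6 >' in lc
--
--     start = next((i for i, lc in enumerate(lines) if is_start(lc)), None)
--     if start is None:
--         return fallback
--     rest = lines[start + 1:]
--     stop = next((i for i, lc in enumerate(rest) if is_end(lc) and not is_start(lc)), len(rest))
--     body = [lc for lc in rest[:stop] if lc and not lc.startswith('[') and not is_start(lc)]
--     result = '\n'.join(body).strip()
--     return result if result else fallback
-- ===== Notes on version B (the rewrite author's own statement) =====
-- stated objective: alternative
-- what changed: A's single pass with a command_found flag and an in-loop break/collect is replaced by an index-based decomposition: find the first start line, find the first end line after it, then slice the lines in between and keep them with one filter.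
import Mathlib
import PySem

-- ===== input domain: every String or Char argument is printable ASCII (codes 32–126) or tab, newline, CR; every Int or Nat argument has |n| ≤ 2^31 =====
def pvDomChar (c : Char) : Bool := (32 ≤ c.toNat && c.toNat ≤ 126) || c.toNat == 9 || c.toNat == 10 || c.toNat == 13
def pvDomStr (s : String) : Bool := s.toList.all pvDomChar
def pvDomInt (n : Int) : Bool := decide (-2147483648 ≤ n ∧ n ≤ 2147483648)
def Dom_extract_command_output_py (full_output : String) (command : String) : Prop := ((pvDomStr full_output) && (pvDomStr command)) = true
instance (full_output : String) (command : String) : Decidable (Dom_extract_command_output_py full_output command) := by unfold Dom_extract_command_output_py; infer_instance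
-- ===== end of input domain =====

-- B replaces A's one-pass flag-and-break loop by a find-start-index / find-end-index /
-- slice-and-filter decomposition (objective: alternative decomposition, same cost).

-- ===== PORT A =====
-- A's single loop over the lines, carrying the command_found flag and the collected
-- output lines; returning output_lines when the end prompt is seen models the 'break'.
def pvALoop (command : String) : List String → Bool → List String → List String
  | [], _, output_lines => output_lines
  | line :: rest, command_found, output_lines =>
    let line_clean := PySem.Str.strip line
    if PySem.Str.isIn command line_clean &&
        (PySem.Str.isIn "meterpreter" line_clean || PySem.Str.isIn "shell" line_clean) then
      pvALoop command rest true output_lines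
    else if command_found &&
        (PySem.Str.isIn "meterpreter >" line_clean || PySem.Str.isIn "shell >" line_clean ||
         PySem.Str.isIn "msf6 >" line_clean) then
      output_lines
    else if command_found && line_clean != "" && !(PySem.Str.startswith line_clean "[") then
      pvALoop command rest command_found (output_lines ++ [line_clean])
    else
      pvALoop command rest command_found output_lines


def extract_command_output_py (full_output : String) (command : String) : String :=
  let lines := (PySem.Str.split? full_output "\n").getD []
  let output_lines := pvALoop command lines false []
  let result := PySem.Str.strip (PySem.Str.join "\n" output_lines)
  if result != "" then result
  else "Commande '" ++ command ++ "' exécutée (pas de sortie visible)"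

-- ===== PORT B =====
def pvIsStart (command lc : String) : Bool :=
  PySem.Str.isIn command lc &&
    (PySem.Str.isIn "meterpreter" lc || PySem.Str.isIn "shell" lc)

def pvIsEnd (lc : String) : Bool :=
  PySem.Str.isIn "meterpreter >" lc || PySem.Str.isIn "shell >" lc ||
    PySem.Str.isIn "msf6 >" lc


def extract_command_output_py_alt (full_output : String) (command : String) : String :=
  let fallback := "Commande '" ++ command ++ "' exécutée (pas de sortie visible)"
  let lines := ((PySem.Str.split? full_output "\n").getD []).map PySem.Str.strip
  match lines.findIdx? (pvIsStart command) with
  | none => fallback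
  | some start =>
    let rest := lines.drop (start + 1)
    let stop := (rest.findIdx? (fun lc => pvIsEnd lc && !pvIsStart command lc)).getD rest.length
    let body := (rest.take stop).filter
      (fun lc => lc != "" && !PySem.Str.startswith lc "[" && !pvIsStart command lc)
    let result := PySem.Str.strip (PySem.Str.join "\n" body)
    if result != "" then result else fallback

-- ===== PRECONDITION & SPEC =====
def Spec_extract_command_output_py (full_output : String) (command : String) (out : String) : Prop := out = extract_command_output_py_alt full_output command
instance (full_output : String) (command : String) (out : String) : Decidable (Spec_extract_command_output_py full_output command out) := by unfold Spec_extract_command_output_py; infer_instance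

-- ===== CLAIM (what is proved, stated in full; the proofs are below) =====
def Claim_equal_extract_command_output_py : Prop := ∀ (full_output : String) (command : String), Dom_extract_command_output_py full_output command → Spec_extract_command_output_py full_output command (extract_command_output_py full_output command)

-- ===== LEMMAS AND PROOFS =====
-- B's "kept body line" predicate and "body between start and end", named for the proofs.
def pvKeep (command lc : String) : Bool :=
  lc != "" && !PySem.Str.startswith lc "[" && !pvIsStart command lc

def pvBody (command : String) (rest : List String) : List String :=
  let stop := (rest.findIdx? (fun lc => pvIsEnd lc && !pvIsStart command lc)).getD rest.length
  (rest.take stop).filter (pvKeep command)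


theorem pvALoop_cons (command line : String) (rest : List String) (found : Bool)
    (acc : List String) :
    pvALoop command (line :: rest) found acc =
      (if pvIsStart command (PySem.Str.strip line) then pvALoop command rest true acc
       else if found && pvIsEnd (PySem.Str.strip line) then acc
       else if found && PySem.Str.strip line != "" &&
           !PySem.Str.startswith (PySem.Str.strip line) "[" then
         pvALoop command rest found (acc ++ [PySem.Str.strip line])
       else pvALoop command rest found acc) := rfl

theorem pvALoop_found (command : String) (ls : List String) (acc : List String) :
    pvALoop command ls true acc = acc ++ pvBody command (ls.map PySem.Str.strip) := by
  induction ls generalizing acc with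
  | nil => simp [pvALoop, pvBody]
  | cons l rest ih =>
    rw [pvALoop_cons]
    set lc := PySem.Str.strip l with hlc
    have hshift : ∀ h : (pvIsEnd lc && !pvIsStart command lc) = false,
        pvBody command (lc :: rest.map PySem.Str.strip) =
          (if pvKeep command lc then [lc] else []) ++ pvBody command (rest.map PySem.Str.strip) := by
      intro h
      simp only [pvBody, List.findIdx?_cons, h, Bool.false_eq_true, if_false]
      cases hfi : List.findIdx? (fun x => pvIsEnd x && !pvIsStart command x)
          (rest.map PySem.Str.strip) with
      | none => cases hk : pvKeep command lc <;> simp [hk]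
      | some j => cases hk : pvKeep command lc <;> simp [hk]
    cases hs : pvIsStart command lc with
    | true =>
      rw [if_pos rfl, ih, List.map_cons, ← hlc, hshift (by simp [hs])]
      have : pvKeep command lc = false := by simp [pvKeep, hs]
      simp [this]
    | false =>
      rw [if_neg (by simp)]
      cases he : pvIsEnd lc with
      | true =>
        rw [if_pos (by simp [he])]
        have hz : pvBody command (lc :: rest.map PySem.Str.strip) = [] := by
          simp [pvBody, List.findIdx?_cons, he, hs]
        rw [List.map_cons, ← hlc, hz]
        simp
      | false =>
        rw [if_neg (by simp)]
        rw [List.map_cons, ← hlc, hshift (by simp [he])]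
        simp only [Bool.true_and]
        cases hk : (lc != "" && !PySem.Str.startswith lc "[") with
        | true =>
          rw [if_pos rfl, ih]
          have hkeep : pvKeep command lc = true := by
            simp only [Bool.and_eq_true] at hk
            have h2 : PySem.Chars.startswith lc.toList ['['] = false := by simpa using hk.2
            simp [pvKeep, hk.1, hs, h2]
          simp [hkeep]
        | false =>
          rw [if_neg (by simp), ih]
          have hkeep : pvKeep command lc = false := by
            rcases Bool.and_eq_false_iff.mp hk with h | h <;>
              simp only [pvKeep, h, Bool.and_false, Bool.false_and]
          simp [hkeep]

set_option maxHeartbeats 1000000 in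
theorem pvALoop_search (command : String) (ls : List String) (acc : List String) :
    pvALoop command ls false acc =
      match (ls.map PySem.Str.strip).findIdx? (pvIsStart command) with
      | none => acc
      | some i => acc ++ pvBody command ((ls.map PySem.Str.strip).drop (i + 1)) := by
  induction ls generalizing acc with
  | nil => simp [pvALoop]
  | cons l rest ih =>
    rw [pvALoop_cons]
    cases hs : pvIsStart command (PySem.Str.strip l) with
    | true =>
      rw [if_pos rfl]
      simp only [List.map_cons, List.findIdx?_cons, hs]
      rw [if_pos trivial]
      simpa only [List.drop_succ_cons, List.drop_zero] using pvALoop_found command rest acc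
    | false =>
      rw [if_neg (by simp), if_neg (by simp), if_neg (by simp), ih]
      simp only [List.map_cons, List.findIdx?_cons, hs, Bool.false_eq_true, if_false]
      cases List.findIdx? (pvIsStart command) (rest.map PySem.Str.strip) with
      | none => rfl
      | some j => rfl

theorem extract_eq (full_output command : String) :
    extract_command_output_py full_output command =
      extract_command_output_py_alt full_output command := by
  unfold extract_command_output_py extract_command_output_py_alt
  dsimp only
  rw [pvALoop_search]
  cases hfi : (List.map PySem.Str.strip ((PySem.Str.split? full_output "\n").getD [])).findIdx?
      (pvIsStart command) with
  | none =>
    have hz : PySem.Str.strip (PySem.Str.join "\n" ([] : List String)) = "" := rfl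
    simp [hz]
  | some i =>
    have hp : pvKeep command =
        fun lc => lc != "" && !PySem.Chars.startswith lc.toList ['['] && !pvIsStart command lc := by
      funext lc; simp [pvKeep]
    simp [pvBody, hp]

-- ===== VERDICT (by name: the statement is the Claim_ definition above) =====
theorem extract_command_output_py_spec : Claim_equal_extract_command_output_py := by
  intro full_output command _
  unfold Spec_extract_command_output_py
  exact extract_eq full_output command
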